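-- pv_equiv track=rewrite | github.com/yuvrajagarwal48/OblivionOverload_Datazen | tests/test_stress_scenarios.py | _compute_cascade_length
-- ===== SOURCE A (Python) =====
-- from typing import Dict, List, Tuple, Optional, Any
--
-- def _compute_cascade_length(default_timeline: List[Tuple[int, int]]) -> int:
--     """
--     Compute cascade length: number of banks that defaulted in consecutive/near-consecutive steps.
--     Returns the length of the longest cascade sequence.
--     """
--     if not default_timeline:
--         return 0
--
--     # Sort by step, then by bank_id
--     sorted_defaults = sorted(default_timeline, key=lambda x: (x[0], x[1]))
--
--     max_cascade = 1
--     current_cascade = 1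
--
--     for i in range(1, len(sorted_defaults)):
--         prev_step = sorted_defaults[i-1][0]
--         curr_step = sorted_defaults[i][0]
--
--         # If defaults are consecutive or near-consecutive (within 2 steps)
--         if curr_step - prev_step <= 2:
--             current_cascade += 1
--             max_cascade = max(max_cascade, current_cascade)
--         else:
--             current_cascade = 1
--
--     return max_cascade
-- ===== SOURCE B (Python) =====
-- from typing import List, Tuple
--
--
-- def _compute_cascade_length(default_timeline: List[Tuple[int, int]]) -> int:
--     """Counter-based re-implementation: aggregate defaults per step into a dict,
--     then scan the sorted distinct steps, summing the per-step counts over maximal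
--     blocks of distinct steps that are within 2 of their predecessor; the answer is
--     the largest block sum (0 for empty input)."""
--     counts = {}
--     for step, _bank in default_timeline:
--         counts[step] = counts.get(step, 0) + 1
--     best = 0
--     block = 0
--     prev = None
--     for step in sorted(counts):
--         if prev is not None and step - prev <= 2:
--             block += counts[step]
--         else:
--             block = counts[step]
--         if block > best:
--             best = block
--         prev = step
--     return best
-- ===== Notes on version B (the rewrite author's own statement) =====
-- stated objective: alternative
-- what changed: Instead of sorting all (step, bank) pairs and scanning every element with a max/current-cascade counter, B aggregates the defaults into a per-step count dictionary, then scans only the sorted distinct steps, summing counts over maximal blocks of distinct steps within 2 of their predecessor and returning the largest block sum.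
import Mathlib
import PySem

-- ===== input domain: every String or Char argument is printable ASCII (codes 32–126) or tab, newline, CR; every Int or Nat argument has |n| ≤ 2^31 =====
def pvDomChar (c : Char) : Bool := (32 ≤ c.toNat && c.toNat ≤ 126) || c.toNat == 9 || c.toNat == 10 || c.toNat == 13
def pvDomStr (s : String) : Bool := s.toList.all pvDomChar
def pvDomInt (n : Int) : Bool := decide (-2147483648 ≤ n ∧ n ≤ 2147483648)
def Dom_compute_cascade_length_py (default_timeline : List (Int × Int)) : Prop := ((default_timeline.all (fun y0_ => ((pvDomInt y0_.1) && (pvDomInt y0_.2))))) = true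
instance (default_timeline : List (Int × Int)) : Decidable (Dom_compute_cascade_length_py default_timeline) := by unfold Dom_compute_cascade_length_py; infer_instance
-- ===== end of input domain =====

-- B replaces A's full lexicographic pair sort + per-element cascade scan by a per-step count
-- dictionary and a scan over the sorted DISTINCT steps that sums counts over blocks (objective: alternative).


-- ===== PORT A =====
def compute_cascade_length_py (default_timeline : List (Int × Int)) : Int :=
  if default_timeline = [] then 0
  else
    let sorted_defaults := PySem.List.sorted2 default_timeline (fun x => x.1) (fun x => x.2)
    let res := (PySem.List.pyRange 1 (sorted_defaults.length : Int) 1).foldl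
      (fun (st : Int × Int) i =>
        let prev_step := (PySem.List.pyGetD sorted_defaults (i - 1) (0, 0)).1
        let curr_step := (PySem.List.pyGetD sorted_defaults i (0, 0)).1
        if curr_step - prev_step ≤ 2 then
          let current_cascade := st.2 + 1
          (max st.1 current_cascade, current_cascade)
        else (st.1, 1)) (1, 1)
    res.1

-- ===== PORT B =====
-- counts[step] in the scan always has the key present (step comes from sorted(counts)), so getD is exact.
def compute_cascade_length_py_alt (default_timeline : List (Int × Int)) : Int :=
  let counts := default_timeline.foldl
    (fun (d : PySem.Dict Int Int) x => d.insert x.1 (d.getD x.1 0 + 1)) PySem.Dict.empty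
  let res := (PySem.List.sorted counts.keys (fun s => s)).foldl
    (fun (st : Int × Int × Option Int) step =>
      let best := st.1
      let block := st.2.1
      let prev := st.2.2
      let block' := match prev with
        | some p => if step - p ≤ 2 then block + counts.getD step 0 else counts.getD step 0
        | none => counts.getD step 0
      (if block' > best then block' else best, block', some step)) (0, 0, none)
  res.1

-- ===== PRECONDITION & SPEC =====
def Spec_compute_cascade_length_py (default_timeline : List (Int × Int)) (out : Int) : Prop := out = compute_cascade_length_py_alt default_timeline
instance (default_timeline : List (Int × Int)) (out : Int) : Decidable (Spec_compute_cascade_length_py default_timeline out) := by unfold Spec_compute_cascade_length_py; infer_instance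

-- ===== CLAIM =====
def Claim_equal_compute_cascade_length_py : Prop := ∀ (default_timeline : List (Int × Int)), Dom_compute_cascade_length_py default_timeline → Spec_compute_cascade_length_py default_timeline (compute_cascade_length_py default_timeline)

-- ===== LEMMAS AND PROOFS =====

-- A's cascade scan, written structurally: state (max_cascade, current_cascade), previous step, remaining steps.
def pvRunA (st : Int × Int) (prev : Int) : List Int → Int × Int
  | [] => st
  | x :: rest =>
    if x - prev ≤ 2 then pvRunA (max st.1 (st.2 + 1), st.2 + 1) x rest
    else pvRunA (st.1, 1) x rest

-- shifting xs[i-1]/xs[i] accesses across a cons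
theorem pvGetD_cons_shift (x : Int × Int) (xs : List (Int × Int)) (d : Int × Int) (i : Int) (hi : 1 ≤ i) :
    PySem.List.pyGetD (x :: xs) i d = PySem.List.pyGetD xs (i - 1) d := by
  lift i to Nat using (by omega) with n
  obtain ⟨k, rfl⟩ : ∃ k, n = k + 1 := ⟨n - 1, by omega⟩
  have h2 : ((((k + 1 : Nat)) : Int)) - 1 = ((k : Nat) : Int) := by push_cast; ring
  rw [h2, PySem.List.pyGetD_natCast, PySem.List.pyGetD_natCast]
  simp

theorem pvFoldl_shift {β : Type} (g : β → (Int × Int) → (Int × Int) → β) (x : Int × Int)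
    (xs : List (Int × Int)) (d : Int × Int) :
    ∀ (a b : Int) (st : β), 1 ≤ a →
      (PySem.List.pyRange (a + 1) (b + 1) 1).foldl
        (fun st i => g st (PySem.List.pyGetD (x :: xs) (i - 1) d) (PySem.List.pyGetD (x :: xs) i d)) st
      = (PySem.List.pyRange a b 1).foldl
        (fun st i => g st (PySem.List.pyGetD xs (i - 1) d) (PySem.List.pyGetD xs i d)) st := by
  intro a b
  induction hn : (b - a).toNat generalizing a b with
  | zero =>
    intro st ha
    rw [PySem.List.pyRange_one_eq_nil (by omega), PySem.List.pyRange_one_eq_nil (by omega)]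
    rfl
  | succ n ih =>
    intro st ha
    rw [PySem.List.pyRange_one_cons (by omega : a + 1 < b + 1), PySem.List.pyRange_one_cons (by omega : a < b)]
    simp only [List.foldl_cons]
    rw [pvGetD_cons_shift x xs d (a + 1) (by omega)]
    rw [show a + 1 - 1 = a from by ring]
    rw [pvGetD_cons_shift x xs d a (by omega)]
    exact ih (a + 1) b (by omega) _ (by omega)

-- A's indexed loop over p :: t computes the structural scan over the step values of t
theorem pvAfold_eq_runA (t : List (Int × Int)) :
    ∀ (p : Int × Int) (st : Int × Int),
      (PySem.List.pyRange 1 ((p :: t).length : Int) 1).foldl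
        (fun (st : Int × Int) i =>
          let prev_step := (PySem.List.pyGetD (p :: t) (i - 1) (0, 0)).1
          let curr_step := (PySem.List.pyGetD (p :: t) i (0, 0)).1
          if curr_step - prev_step ≤ 2 then
            let current_cascade := st.2 + 1
            (max st.1 current_cascade, current_cascade)
          else (st.1, 1)) st
      = pvRunA st p.1 (t.map (fun x => x.1)) := by
  induction t with
  | nil =>
    intro p st
    rw [show ((([p] : List (Int × Int)).length : Int)) = 1 by simp,
        PySem.List.pyRange_one_eq_nil (by omega)]
    simp [pvRunA]
  | cons q t ih =>
    intro p st
    have hlen : (((p :: q :: t).length : Int)) = (t.length : Int) + 2 := by simp; omega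
    rw [hlen, PySem.List.pyRange_one_cons (by omega : (1 : Int) < (t.length : Int) + 2)]
    simp only [List.foldl_cons]
    have h0 : PySem.List.pyGetD (p :: q :: t) ((1 : Int) - 1) ((0 : Int), (0 : Int)) = p := by
      norm_num [PySem.List.pyGetD_zero_cons]
    have h1 : PySem.List.pyGetD (p :: q :: t) (1 : Int) ((0 : Int), (0 : Int)) = q := by
      rw [pvGetD_cons_shift _ _ _ 1 (by omega)]
      norm_num [PySem.List.pyGetD_zero_cons]
    rw [h0, h1]
    have hshift := pvFoldl_shift
      (fun (st : Int × Int) (a b : Int × Int) =>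
        if b.1 - a.1 ≤ 2 then (max st.1 (st.2 + 1), st.2 + 1) else (st.1, 1))
      p (q :: t) ((0 : Int), (0 : Int)) 1 ((t.length : Int) + 1)
    simp only [pvRunA, List.map_cons]
    by_cases hc : q.1 - p.1 ≤ 2
    · simp only [hc, if_pos]
      rw [show (t.length : Int) + 2 = ((t.length : Int) + 1) + 1 by ring]
      rw [hshift _ (by omega)]
      have : ((t.length : Int) + 1) = (((q :: t).length : Int)) := by simp
      rw [this, ih q (max st.1 (st.2 + 1), st.2 + 1)]
    · simp only [hc, if_false]
      rw [show (t.length : Int) + 2 = ((t.length : Int) + 1) + 1 by ring]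
      rw [hshift _ (by omega)]
      have : ((t.length : Int) + 1) = (((q :: t).length : Int)) := by simp
      rw [this, ih q (st.1, 1)]

-- pairwise-on-first-components is preserved by A's lexicographic insertion
theorem pvInsertBy_pairwise (before : (Int × Int) → (Int × Int) → Bool)
    (hT : ∀ a b, before a b = true → a.1 ≤ b.1)
    (hF : ∀ a b, before a b = false → b.1 ≤ a.1)
    (x : Int × Int) (ys : List (Int × Int))
    (hys : List.Pairwise (fun a b => a.1 ≤ b.1) ys) :
    List.Pairwise (fun a b => a.1 ≤ b.1) (PySem.List.insertBy before x ys) := by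
  induction ys with
  | nil => simp [PySem.List.insertBy]
  | cons y ys ih =>
    rw [List.pairwise_cons] at hys
    obtain ⟨hy, hys⟩ := hys
    by_cases hb : before x y = true
    · rw [show PySem.List.insertBy before x (y :: ys) = x :: y :: ys by
        simp [PySem.List.insertBy, hb]]
      refine List.Pairwise.cons ?_ (List.Pairwise.cons hy hys)
      intro z hz
      rcases List.mem_cons.mp hz with rfl | hz
      · exact hT _ _ hb
      · exact le_trans (hT _ _ hb) (hy z hz)
    · rw [show PySem.List.insertBy before x (y :: ys) = y :: PySem.List.insertBy before x ys by
        simp [PySem.List.insertBy, hb]]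
      refine List.Pairwise.cons ?_ (ih hys)
      intro z hz
      rcases (PySem.List.insertBy_mem_iff before x z ys).mp hz with rfl | hz
      · exact hF _ _ (by simpa using hb)
      · exact hy z hz

theorem pvSorted2_pairwise (xs : List (Int × Int)) :
    List.Pairwise (fun a b => a.1 ≤ b.1)
      (PySem.List.sorted2 xs (fun x => x.1) (fun x => x.2)) := by
  show List.Pairwise _ (List.foldl _ [] xs)
  have key : ∀ (l : List (Int × Int)) (acc : List (Int × Int)),
      List.Pairwise (fun a b => a.1 ≤ b.1) acc →
      List.Pairwise (fun a b => a.1 ≤ b.1)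
        (List.foldl (fun acc x => PySem.List.insertBy
          (fun a b => decide (a.1 < b.1) || !decide (b.1 < a.1) && decide (a.2 < b.2)) x acc) acc l) := by
    intro l
    induction l with
    | nil => intro acc h; exact h
    | cons x l ih =>
      intro acc h
      exact ih _ (pvInsertBy_pairwise _
        (by intro a b hab; simp at hab; rcases hab with h1 | h1 <;> omega)
        (by intro a b hab; simp at hab; omega) x acc h)
  exact key xs [] List.Pairwise.nil

-- the step values of A's lexicographically sorted list are the sorted step values
theorem pvSteps_eq (xs : List (Int × Int)) :
    (PySem.List.sorted2 xs (fun x => x.1) (fun x => x.2)).map (fun x => x.1)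
    = PySem.List.sorted (xs.map (fun x => x.1)) (fun s => s) := by
  refine PySem.List.eq_of_perm_of_pairwise_le_of_injective (fun s => s) (fun a b h => h) ?_ ?_ ?_
  · exact ((PySem.List.sorted2_perm xs _ _ false).map _).trans
      ((PySem.List.sorted_perm (xs.map (fun x => x.1)) _ false).symm)
  · exact (List.pairwise_map).mpr (pvSorted2_pairwise xs)
  · exact PySem.List.sorted_pairwise _ _

-- ===== B-side lemmas =====

-- counting a flatMap of replicates over distinct keys
theorem pvCount_flat (cnt : Int → Nat) (x : Int) :
    ∀ (keys : List Int), keys.Nodup →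
      (keys.flatMap (fun k => List.replicate (cnt k) k)).count x
      = if x ∈ keys then cnt x else 0 := by
  intro keys
  induction keys with
  | nil => simp
  | cons k keys ih =>
    intro hnd
    rw [List.nodup_cons] at hnd
    rw [List.flatMap_cons, List.count_append, ih hnd.2]
    by_cases hx : x = k
    · subst hx
      simp [hnd.1]
    · simp [List.count_replicate, Ne.symm hx, hx]

-- blocks of replicates over strictly increasing keys are pairwise ≤
theorem pvPairwise_flat (cnt : Int → Nat) :
    ∀ (keys : List Int), keys.Pairwise (· < ·) →
      (keys.flatMap (fun k => List.replicate (cnt k) k)).Pairwise (· ≤ ·) := by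
  intro keys
  induction keys with
  | nil => simp
  | cons k keys ih =>
    intro hlt
    rw [List.pairwise_cons] at hlt
    rw [List.flatMap_cons]
    rw [List.pairwise_append]
    refine ⟨List.pairwise_replicate.mpr (Or.inr le_rfl), ih hlt.2, ?_⟩
    intro a ha b hb
    rw [List.eq_of_mem_replicate ha]
    obtain ⟨k', hk', hb'⟩ := List.mem_flatMap.mp hb
    rw [List.eq_of_mem_replicate hb']
    exact le_of_lt (hlt.1 k' hk')

-- the sorted multiset of steps is the flatMap of replicates over the sorted distinct steps
theorem pvSortedFlat (steps : List Int) :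
    PySem.List.sorted steps (fun s => s)
    = (PySem.List.sorted (PySem.Set.ofList steps) (fun s => s)).flatMap
        (fun k => List.replicate (steps.count k) k) := by
  set keys := PySem.List.sorted (PySem.Set.ofList steps) (fun s => s) with hkeys
  have hmemk : ∀ x, x ∈ keys ↔ x ∈ steps := by
    intro x
    rw [hkeys, PySem.List.mem_sorted, PySem.Set.mem_ofList]
  have hnd : keys.Nodup :=
    (PySem.List.sorted_perm (PySem.Set.ofList steps) (fun s : Int => s) false).nodup_iff.mpr
      (PySem.Set.nodup_ofList steps)
  have hlt : keys.Pairwise (· < ·) := PySem.List.sorted_ofList_pairwise_lt steps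
  refine PySem.List.sorted_id_eq_of_perm_of_pairwise _ _ ?_ ?_
  · rw [List.perm_iff_count]
    intro x
    rw [pvCount_flat _ x keys hnd]
    by_cases hx : x ∈ steps
    · simp [(hmemk x).mpr hx]
    · simp [List.count_eq_zero.mpr hx]
  · exact pvPairwise_flat (fun k => steps.count k) keys hlt

-- A's scan absorbs a block of duplicates of the current step
theorem pvBlock (k : Int) (rest : List Int) :
    ∀ (n : Nat) (b c : Int), c ≤ b →
      pvRunA (b, c) k (List.replicate n k ++ rest)
      = pvRunA (max b (c + n), c + n) k rest := by
  intro n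
  induction n with
  | zero => intro b c h; simp [max_eq_left h]
  | succ n ih =>
    intro b c h
    rw [List.replicate_succ, List.cons_append]
    rw [show pvRunA (b, c) k ((k :: (List.replicate n k ++ rest)))
        = pvRunA (max b (c + 1), c + 1) k (List.replicate n k ++ rest) by
      simp [pvRunA]]
    rw [ih _ _ (le_max_right _ _)]
    congr 1
    simp only [Prod.mk.injEq]
    constructor
    · rw [max_assoc, max_eq_right (by omega : c + 1 ≤ c + 1 + (n : Int))]
      congr 1
      push_cast; ring
    · push_cast; ring

-- B's scan step as a named function (the foldl body over the distinct sorted steps)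
def pvStepB (cnt : Int → Int) (st : Int × Int × Option Int) (step : Int) : Int × Int × Option Int :=
  let block' := match st.2.2 with
    | some p => if step - p ≤ 2 then st.2.1 + cnt step else cnt step
    | none => cnt step
  (if block' > st.1 then block' else st.1, block', some step)

-- main correspondence: A's scan over the flatMap equals B's scan over the distinct keys
theorem pvMain (cnt : Int → Nat) :
    ∀ (keys : List Int), (∀ k ∈ keys, 1 ≤ cnt k) →
      ∀ (p b c : Int), c ≤ b → 1 ≤ b →
        (pvRunA (b, c) p (keys.flatMap (fun k => List.replicate (cnt k) k))).1
        = (keys.foldl (pvStepB (fun k => (cnt k : Int))) (b, c, some p)).1 := by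
  intro keys
  induction keys with
  | nil => intro _ p b c _ _; simp [pvRunA]
  | cons k keys ih =>
    intro hcnt p b c hcb hb
    obtain ⟨m, hm⟩ : ∃ m, cnt k = m + 1 := ⟨cnt k - 1, by have := hcnt k (by simp); omega⟩
    rw [List.flatMap_cons, hm, List.replicate_succ, List.cons_append]
    rw [List.foldl_cons]
    by_cases hc : k - p ≤ 2
    · have h1 : pvRunA (b, c) p (k :: (List.replicate m k ++ keys.flatMap (fun k => List.replicate (cnt k) k)))
          = pvRunA (max b (c + 1), c + 1) k (List.replicate m k ++ keys.flatMap (fun k => List.replicate (cnt k) k)) := by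
        simp [pvRunA, hc]
      rw [h1, pvBlock _ _ _ _ _ (le_max_right _ _)]
      have h2 : pvStepB (fun k => (cnt k : Int)) (b, c, some p) k
          = (max b (c + 1 + (m : Int)), c + 1 + (m : Int), some k) := by
        simp only [pvStepB, hc, if_pos, hm, Prod.mk.injEq]
        push_cast
        refine ⟨?_, by ring, trivial⟩
        rw [max_def]
        split_ifs
        all_goals ((try ring_nf at *) <;> omega)
      rw [h2, max_assoc, max_eq_right (by omega : c + 1 ≤ c + 1 + (m : Int))]
      exact ih (fun j hj => hcnt j (by simp [hj])) k _ _ (le_max_right _ _) (by omega)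
    · have h1 : pvRunA (b, c) p (k :: (List.replicate m k ++ keys.flatMap (fun k => List.replicate (cnt k) k)))
          = pvRunA (b, 1) k (List.replicate m k ++ keys.flatMap (fun k => List.replicate (cnt k) k)) := by
        simp [pvRunA, hc]
      rw [h1]
      have h2 : pvStepB (fun k => (cnt k : Int)) (b, c, some p) k
          = (max b (1 + (m : Int)), 1 + (m : Int), some k) := by
        simp only [pvStepB, hc, if_neg, hm, Prod.mk.injEq, not_false_iff]
        push_cast
        refine ⟨?_, by ring, trivial⟩
        rw [max_def]
        split_ifs
        all_goals ((try ring_nf at *) <;> omega)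
      rw [h2]
      have hb1 : pvRunA (b, 1) k (List.replicate m k ++ keys.flatMap (fun k => List.replicate (cnt k) k))
          = pvRunA (max b (1 + (m : Int)), 1 + (m : Int)) k (keys.flatMap (fun k => List.replicate (cnt k) k)) :=
        pvBlock _ _ _ _ _ (by omega)
      rw [hb1]
      exact ih (fun j hj => hcnt j (by simp [hj])) k _ _ (le_max_right _ _) (by omega)

-- ===== VERDICT =====
theorem compute_cascade_length_py_spec : Claim_equal_compute_cascade_length_py := by
  intro dt _
  unfold Spec_compute_cascade_length_py compute_cascade_length_py compute_cascade_length_py_alt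
  by_cases hdt : dt = []
  · subst hdt; rfl
  have hcounts : dt.foldl (fun (d : PySem.Dict Int Int) x => d.insert x.1 (d.getD x.1 0 + 1)) PySem.Dict.empty
      = PySem.Dict.counter (dt.map (fun x => x.1)) := by
    have hmap := (List.foldl_map (f := fun (x : Int × Int) => x.1)
      (g := fun (d : PySem.Dict Int Int) k => d.insert k (d.getD k 0 + 1))
      (l := dt) (init := PySem.Dict.empty)).symm
    exact hmap.trans (PySem.Dict.foldl_insert_getD_add_one_eq_counter _)
  rw [hcounts]
  simp only [PySem.Dict.keys_counter]
  set steps := dt.map (fun x => x.1) with hsteps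
  have hfold : ∀ (l : List Int) (st : Int × Int × Option Int),
      l.foldl (fun (st : Int × Int × Option Int) step =>
        let best := st.1
        let block := st.2.1
        let prev := st.2.2
        let block' := match prev with
          | some p => if step - p ≤ 2 then block + (PySem.Dict.counter steps).getD step 0
                      else (PySem.Dict.counter steps).getD step 0
          | none => (PySem.Dict.counter steps).getD step 0
        (if block' > best then block' else best, block', some step)) st
      = l.foldl (pvStepB (fun k => (steps.count k : Int))) st := by
    intro l st
    congr 1
    funext st' step
    cases hp : st'.2.2 <;> simp [pvStepB, PySem.Dict.getD_counter, hp]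
  rw [hfold]
  simp only [hdt, if_false]
  have hne : PySem.List.sorted2 dt (fun x => x.1) (fun x => x.2) ≠ [] := by
    intro h
    exact hdt ((h ▸ PySem.List.sorted2_perm dt (fun x => x.1) (fun x => x.2) false).symm.eq_nil)
  obtain ⟨p, t, hpt⟩ := List.exists_cons_of_ne_nil hne
  rw [hpt, pvAfold_eq_runA t p (1, 1)]
  have h1 := pvSteps_eq dt
  rw [hpt, List.map_cons] at h1
  rw [pvSortedFlat steps] at h1
  cases hk : PySem.List.sorted (PySem.Set.ofList steps) (fun s : Int => s) with
  | nil => rw [hk] at h1; simp at h1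
  | cons k0 kt =>
    rw [hk] at h1
    have hk0s : k0 ∈ steps := by
      have : k0 ∈ PySem.List.sorted (PySem.Set.ofList steps) (fun s : Int => s) := by
        rw [hk]; exact List.mem_cons_self
      rw [PySem.List.mem_sorted, PySem.Set.mem_ofList] at this
      exact this
    obtain ⟨m, hm⟩ : ∃ m, steps.count k0 = m + 1 :=
      ⟨steps.count k0 - 1, by have := List.count_pos_iff.mpr hk0s; omega⟩
    rw [List.flatMap_cons, hm, List.replicate_succ, List.cons_append] at h1
    obtain ⟨hp1, ht1⟩ := List.cons.injEq .. ▸ h1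
    -- A side
    rw [hp1, ht1, pvBlock _ _ _ _ _ (le_refl (1 : Int)),
        max_eq_right (by omega : (1 : Int) ≤ 1 + (m : Int))]
    -- B side
    rw [List.foldl_cons]
    have hstep0 : pvStepB (fun k => (steps.count k : Int)) (0, 0, none) k0
        = (1 + (m : Int), 1 + (m : Int), some k0) := by
      simp only [pvStepB, hm, Prod.mk.injEq]
      push_cast
      refine ⟨?_, by ring, trivial⟩
      split_ifs
      all_goals ((try ring_nf at *) <;> omega)
    rw [hstep0]
    have hcnt' : ∀ j ∈ kt, 1 ≤ steps.count j := by
      intro j hj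
      have : j ∈ PySem.List.sorted (PySem.Set.ofList steps) (fun s : Int => s) := by
        rw [hk]; exact List.mem_cons_of_mem _ hj
      rw [PySem.List.mem_sorted, PySem.Set.mem_ofList] at this
      exact List.count_pos_iff.mpr this
    exact pvMain (fun k => steps.count k) kt hcnt' k0 (1 + (m : Int)) (1 + (m : Int))
      le_rfl (by omega)
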